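-- pv_equiv track=rewrite | github.com/ki-ARA-sh/Algorithms_Tutorial | _041_count/count_2.py | count_k
-- ===== SOURCE A (Python) =====
-- from bisect import bisect as upper_bound
--
-- def count_k(arr, n, k):
--     # Variable to store final answer
--     ans = 0
--
--     # Loop to find prefix-sum
--     for i in range(1, n):
--         arr[i] += arr[i - 1]
--         if (arr[i] > k or arr[i] < -1 * k):
--             ans += 1
--
--     if (arr[0] > k or arr[0] < -1 * k):
--         ans += 1
--
--     # Sorting prefix-sum array
--     arr = sorted(arr)
--
--     # Loop to find upper_bound
--     # for each element
--     for i in range(n):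
--         ans += n - upper_bound(arr, arr[i] + k)
--
--         # Returning final answer
--     return ans
-- ===== SOURCE B (Python) =====
-- def count_k(arr, n, k):
--     # Same in-place prefix-sum phase as the original (the caller observes the
--     # mutation of arr), then one two-pointer sweep over the sorted prefix sums
--     # instead of n binary searches (same overall cost: the sort dominates).
--     ans = 0
--     for i in range(1, n):
--         arr[i] += arr[i - 1]
--         if arr[i] > k or arr[i] < -k:
--             ans += 1
--     if arr[0] > k or arr[0] < -k:
--         ans += 1
--     s = sorted(arr)
--     m = len(s)
--     j = 0
--     for i in range(n):
--         t = s[i] + k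
--         while j < m and s[j] <= t:
--             j += 1
--         ans += n - j
--     return ans
-- ===== Notes on version B (the rewrite author's own statement) =====
-- stated objective: alternative
-- what changed: The n per-element binary searches over the sorted prefix-sum array are replaced by a single monotone two-pointer sweep (j only ever advances), keeping the in-place prefix-sum phase identical; the sort dominates, so overall cost is unchanged.
import Mathlib
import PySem

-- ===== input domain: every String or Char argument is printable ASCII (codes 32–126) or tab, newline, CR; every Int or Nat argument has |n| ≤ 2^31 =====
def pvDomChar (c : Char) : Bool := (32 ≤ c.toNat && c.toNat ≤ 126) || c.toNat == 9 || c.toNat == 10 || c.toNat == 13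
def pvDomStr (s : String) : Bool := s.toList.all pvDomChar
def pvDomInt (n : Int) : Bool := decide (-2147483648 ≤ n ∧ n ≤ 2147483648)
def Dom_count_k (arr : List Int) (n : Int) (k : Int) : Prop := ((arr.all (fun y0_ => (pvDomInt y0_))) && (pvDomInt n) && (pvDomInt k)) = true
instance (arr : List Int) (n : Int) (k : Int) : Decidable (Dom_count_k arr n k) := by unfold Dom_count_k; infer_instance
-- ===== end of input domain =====

-- B replaces the n binary searches with one monotone two-pointer sweep over the sorted prefix
-- sums (objective: alternative algorithm, same overall cost). Both Pythons mutate arr in place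
-- identically (prefix sums); the theorems here are about the return value.

-- ===== PORT A =====
-- one iteration of the prefix-sum loop: arr[i] += arr[i-1]; count if out of [-k, k]
-- (i comes from range(1, n), so i ≥ 1: indices are in range under Pre_)
def pvStep1 (k : Int) (st : List Int × Int) (i : Int) : List Int × Int :=
  let v := PySem.List.pyGetD st.1 i 0 + PySem.List.pyGetD st.1 (i - 1) 0
  (PySem.List.pySetD st.1 i v, if k < v ∨ v < -1 * k then st.2 + 1 else st.2)

-- the prefix-sum phase, textually identical in A and in B (both start ans = 0)
def pvPhase1 (arr : List Int) (n k : Int) : List Int × Int :=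
  (PySem.List.pyRange 1 n).foldl (pvStep1 k) (arr, 0)

-- one iteration of A's second loop: ans += n - upper_bound(arr, arr[i] + k)
def pvStepA (s : List Int) (n k : Int) (ans : Int) (i : Int) : Int :=
  ans + (n - (PySem.List.bisectRight s (PySem.List.pyGetD s i 0 + k) : Int))

def count_k (arr : List Int) (n : Int) (k : Int) : Int :=
  let st := pvPhase1 arr n k
  let ans := if k < PySem.List.pyGetD st.1 0 0 ∨ PySem.List.pyGetD st.1 0 0 < -1 * k
             then st.2 + 1 else st.2
  let s := PySem.List.sorted st.1 (fun x => x)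
  (PySem.List.pyRange 0 n).foldl (pvStepA s n k) ans

-- ===== PORT B =====
-- the inner while: while j < m and s[j] <= t: j += 1
def pvAdv (s : List Int) (m t j : Int) : Int :=
  if h : j < m ∧ PySem.List.pyGetD s j 0 ≤ t then pvAdv s m t (j + 1) else j
termination_by (m - j).toNat
decreasing_by omega

-- one iteration of B's sweep loop: advance j, then ans += n - j
def pvStepB (s : List Int) (m n k : Int) (st : Int × Int) (i : Int) : Int × Int :=
  let t := PySem.List.pyGetD s i 0 + k
  let j := pvAdv s m t st.1
  (j, st.2 + (n - j))

def count_k_alt (arr : List Int) (n : Int) (k : Int) : Int :=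
  let st := pvPhase1 arr n k
  let ans := if k < PySem.List.pyGetD st.1 0 0 ∨ PySem.List.pyGetD st.1 0 0 < -1 * k
             then st.2 + 1 else st.2
  let s := PySem.List.sorted st.1 (fun x => x)
  let m := (s.length : Int)
  ((PySem.List.pyRange 0 n).foldl (pvStepB s m n k) (0, ans)).2

-- ===== PRECONDITION & SPEC =====
-- A raises IndexError exactly when arr is empty (arr[0]) or n > len(arr) (arr[i] in the first
-- loop); Pre_ excludes exactly those inputs and nothing else (negative n is admitted).
def Pre_count_k (arr : List Int) (n : Int) (k : Int) : Prop :=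
  arr ≠ [] ∧ n ≤ (arr.length : Int)
instance (arr : List Int) (n : Int) (k : Int) : Decidable (Pre_count_k arr n k) := by
  unfold Pre_count_k; infer_instance
def pvWitness_count_k : List Int × Int × Int := ([1, -2, 3], 3, 1)

def Spec_count_k (arr : List Int) (n : Int) (k : Int) (out : Int) : Prop := out = count_k_alt arr n k
instance (arr : List Int) (n : Int) (k : Int) (out : Int) : Decidable (Spec_count_k arr n k out) := by unfold Spec_count_k; infer_instance

-- ===== CLAIM (what is proved, stated in full; the proofs are below) =====
def Claim_equal_count_k : Prop := ∀ (arr : List Int) (n : Int) (k : Int), Dom_count_k arr n k → Pre_count_k arr n k → Spec_count_k arr n k (count_k arr n k)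

-- ===== LEMMAS AND PROOFS =====

-- the prefix-sum phase preserves the length of the array
theorem pvFoldl_pvStep1_len (k : Int) :
    ∀ (l : List Int) (st : List Int × Int),
      ((l.foldl (pvStep1 k) st).1.length = st.1.length) := by
  intro l
  induction l with
  | nil => intro st; rfl
  | cons i t ih =>
      intro st
      rw [List.foldl_cons, ih]
      simp [pvStep1, PySem.List.length_pySetD]

-- the two-pointer advance lands exactly on bisect_right, provided it starts at or before it
theorem pvAdv_eq (s : List Int) (t : Int) (hs : s.Pairwise (· ≤ ·)) :
    ∀ (d : Nat) (j : Int), 0 ≤ j → j ≤ (PySem.List.bisectRight s t : Int) →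
      ((PySem.List.bisectRight s t : Int) - j).toNat = d →
      pvAdv s (s.length : Int) t j = (PySem.List.bisectRight s t : Int) := by
  obtain ⟨hble, hlt, hgt⟩ := PySem.List.bisectRight_spec s t hs
  intro d
  induction d with
  | zero =>
      intro j hj0 hjb hd
      have hjeq : j = (PySem.List.bisectRight s t : Int) := by omega
      subst hjeq
      rw [pvAdv]
      have : ¬ ((PySem.List.bisectRight s t : Int) < (s.length : Int) ∧
          PySem.List.pyGetD s (PySem.List.bisectRight s t : Int) 0 ≤ t) := by
        rintro ⟨h1, h2⟩
        have hlen : PySem.List.bisectRight s t < s.length := by exact_mod_cast h1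
        have hget : PySem.List.pyGetD s (PySem.List.bisectRight s t : Int) 0 =
            s[PySem.List.bisectRight s t] := by
          rw [PySem.List.pyGetD_eq_getElem s 0 (Int.natCast_nonneg _) h1]
          simp
        have := hgt (PySem.List.bisectRight s t) hlen (le_refl _)
        rw [hget] at h2
        omega
      rw [dif_neg this]
  | succ d ih =>
      intro j hj0 hjb hd
      have hjlt : j < (PySem.List.bisectRight s t : Int) := by omega
      have hjlen : j < (s.length : Int) := by
        have := hble; omega
      rw [pvAdv]
      have hget : PySem.List.pyGetD s j 0 = s[j.toNat]'(by omega) := by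
        rw [PySem.List.pyGetD_eq_getElem s 0 hj0 hjlen]
      have hle : PySem.List.pyGetD s j 0 ≤ t := by
        rw [hget]
        exact hlt j.toNat (by omega) (by omega)
      rw [dif_pos ⟨hjlen, hle⟩]
      exact ih (j + 1) (by omega) (by omega) (by omega)

-- bisect_right is monotone in its argument on a sorted list
theorem pvBis_mono (s : List Int) (hs : s.Pairwise (· ≤ ·)) (x y : Int) (hxy : x ≤ y) :
    PySem.List.bisectRight s x ≤ PySem.List.bisectRight s y := by
  by_contra h
  push Not at h
  obtain ⟨hxle, hxlt, _⟩ := PySem.List.bisectRight_spec s x hs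
  obtain ⟨_, _, hygt⟩ := PySem.List.bisectRight_spec s y hs
  have hj : PySem.List.bisectRight s y < s.length := lt_of_lt_of_le h hxle
  have h1 := hxlt (PySem.List.bisectRight s y) hj h
  have h2 := hygt (PySem.List.bisectRight s y) hj (le_refl _)
  omega

-- sorted list: elements are monotone in the index
theorem pvSorted_get_mono (s : List Int) (hs : s.Pairwise (· ≤ ·))
    (p q : Nat) (hpq : p ≤ q) (hq : q < s.length) : s[p]'(by omega) ≤ s[q] := by
  rcases lt_or_eq_of_le hpq with h | h
  · exact (List.pairwise_iff_getElem.mp hs) p q (by omega) hq h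
  · subst h; exact le_refl _

-- B's sweep over the tail of the range equals A's per-element bisect sum
theorem pvLoop_eq (s : List Int) (n k : Int) (hs : s.Pairwise (· ≤ ·))
    (hn : n ≤ (s.length : Int)) :
    ∀ (d : Nat) (a j ans : Int), 0 ≤ a → 0 ≤ j → (n - a).toNat = d →
      (∀ i : Int, a ≤ i → i < n →
        j ≤ (PySem.List.bisectRight s (PySem.List.pyGetD s i 0 + k) : Int)) →
      ((PySem.List.pyRange a n).foldl (pvStepB s (s.length : Int) n k) (j, ans)).2
        = (PySem.List.pyRange a n).foldl (pvStepA s n k) ans := by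
  intro d
  induction d with
  | zero =>
      intro a j ans _ _ hd _
      rw [PySem.List.pyRange_one_eq_nil (by omega)]
      rfl
  | succ d ih =>
      intro a j ans ha0 hj0 hd hinv
      have han : a < n := by omega
      rw [PySem.List.pyRange_one_cons han, List.foldl_cons, List.foldl_cons]
      have hb := pvAdv_eq s (PySem.List.pyGetD s a 0 + k) hs _ j hj0 (hinv a (le_refl _) han) rfl
      have hstep : pvStepB s (s.length : Int) n k (j, ans) a =
          ((PySem.List.bisectRight s (PySem.List.pyGetD s a 0 + k) : Int),
           ans + (n - (PySem.List.bisectRight s (PySem.List.pyGetD s a 0 + k) : Int))) := by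
        simp only [pvStepB, hb]
      rw [hstep]
      have hstepA : pvStepA s n k ans a =
          ans + (n - (PySem.List.bisectRight s (PySem.List.pyGetD s a 0 + k) : Int)) := rfl
      rw [hstepA]
      apply ih (a + 1) _ _ (by omega) (by positivity) (by omega)
      intro i hi1 hi2
      have hga : PySem.List.pyGetD s a 0 = s[a.toNat]'(by omega) :=
        PySem.List.pyGetD_eq_getElem s 0 ha0 (by omega)
      have hgi : PySem.List.pyGetD s i 0 = s[i.toNat]'(by omega) :=
        PySem.List.pyGetD_eq_getElem s 0 (by omega) (by omega)
      have hmono : PySem.List.pyGetD s a 0 ≤ PySem.List.pyGetD s i 0 := by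
        rw [hga, hgi]
        exact pvSorted_get_mono s hs a.toNat i.toNat (by omega) (by omega)
      exact_mod_cast pvBis_mono s hs _ _ (by omega)

-- ===== VERDICT (by name: the statement is the Claim_ definition above) =====
theorem count_k_spec : Claim_equal_count_k := by
  intro arr n k _ hpre
  unfold Spec_count_k count_k count_k_alt
  have hs : (PySem.List.sorted (pvPhase1 arr n k).1 (fun x => x)).Pairwise (· ≤ ·) :=
    PySem.List.sorted_pairwise (pvPhase1 arr n k).1 (fun x => x)
  have hlen : (PySem.List.sorted (pvPhase1 arr n k).1 (fun x => x)).length = arr.length := by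
    rw [PySem.List.length_sorted]
    exact pvFoldl_pvStep1_len k _ (arr, 0)
  have hn : n ≤ ((PySem.List.sorted (pvPhase1 arr n k).1 (fun x => x)).length : Int) := by
    rw [hlen]; exact hpre.2
  exact (pvLoop_eq _ n k hs hn (n - 0).toNat 0 0 _ (le_refl _) (le_refl _) rfl
    (fun i _ _ => Int.natCast_nonneg _)).symm
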